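-- pv_equiv track=rewrite | github.com/beliote/ChessBot | simple_tuner.py | get_material_balance
-- ===== SOURCE A (Python) =====
-- def get_material_balance(fen):
--     """
--     Calcule la différence de matériel du point de vue des BLANCS.
--     Ex: Si Blanc a 1 Cavalier de plus, returns {'N': 1, ...}
--     """
--     board_part = fen.split(" ")[0]
--     counts = {'P': 0, 'N': 0, 'B': 0, 'R': 0, 'Q': 0}
--
--     for char in board_part:
--         if char == '/': continue
--         elif char.isdigit(): continue
--
--         # Pièces blanches (Positif)
--         if char.isupper():
--             if char in counts: counts[char] += 1
--         # Pièces noires (Négatif)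
--         elif char.islower():
--             upper = char.upper()
--             if upper in counts: counts[upper] -= 1
--
--     return counts
-- ===== SOURCE B (Python) =====
-- def get_material_balance(fen):
--     """
--     Calcule la différence de matériel du point de vue des BLANCS.
--     Ex: Si Blanc a 1 Cavalier de plus, returns {'N': 1, ...}
--     """
--     board_part = fen.split(" ")[0]
--     # one tally pass over the board, then a fixed 5-key derivation
--     freq = {}
--     for ch in board_part:
--         freq[ch] = freq.get(ch, 0) + 1
--     return {p: freq.get(p, 0) - freq.get(p.lower(), 0) for p in "PNBRQ"}
-- ===== Notes on version B (the rewrite author's own statement) =====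
-- stated objective: idiomatic
-- what changed: Replaces the per-character classify-and-nudge branching loop over a pre-seeded counts dict by a two-phase computation: one frequency tally of every board character, then a fixed five-key derivation counts[p] = freq[p] - freq[p.lower()] over 'PNBRQ'.
import Mathlib
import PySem

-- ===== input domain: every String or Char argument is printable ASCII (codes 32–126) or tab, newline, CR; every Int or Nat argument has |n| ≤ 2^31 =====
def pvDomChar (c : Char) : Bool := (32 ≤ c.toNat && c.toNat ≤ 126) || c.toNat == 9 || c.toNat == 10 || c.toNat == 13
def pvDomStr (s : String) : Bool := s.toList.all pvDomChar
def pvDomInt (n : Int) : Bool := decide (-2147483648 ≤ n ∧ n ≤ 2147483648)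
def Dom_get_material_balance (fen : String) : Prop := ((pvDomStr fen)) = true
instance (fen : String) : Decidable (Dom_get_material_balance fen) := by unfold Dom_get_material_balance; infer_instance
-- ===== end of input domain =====

-- B replaces A's per-character classify-and-nudge loop by one frequency tally of the board
-- followed by a fixed five-key derivation counts[p] = freq[p] - freq[p.lower()]; same results.

-- ===== PORT A =====
-- Python's dict keys are the single characters 'P','N','B','R','Q'; they are kept as Char
-- inside the loop and rendered as 1-character Strings when the dict is returned.
def pvStepA (counts : PySem.Dict Char Int) (char : Char) : PySem.Dict Char Int :=
  if char == '/' then counts                         -- if char == '/': continue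
  else if PySem.Chars.isdigit char then counts       -- elif char.isdigit(): continue
  else if PySem.Chars.isupper char then              -- if char.isupper():
    (if counts.contains char then counts.modify char 0 (· + 1) else counts)
  else if PySem.Chars.islower char then              -- elif char.islower():
    (let upper := PySem.Chars.upperChar char
     if counts.contains upper then counts.modify upper 0 (· - 1) else counts)
  else counts

def get_material_balance (fen : String) : List (String × Int) :=
  -- fen.split(" ")[0]  (split with a non-empty separator never returns an empty list)
  let board_part := PySem.List.pyGetD (PySem.Chars.splitOn fen.toList [' ']) 0 []
  let counts : PySem.Dict Char Int :=
    PySem.Dict.ofList [('P', 0), ('N', 0), ('B', 0), ('R', 0), ('Q', 0)]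
  let final := board_part.foldl pvStepA counts
  final.items.map (fun kv => (String.mk [kv.1], kv.2))

-- ===== PORT B =====
def get_material_balance_alt (fen : String) : List (String × Int) :=
  let board_part := PySem.List.pyGetD (PySem.Chars.splitOn fen.toList [' ']) 0 []
  -- freq[ch] = freq.get(ch, 0) + 1
  let freq : PySem.Dict Char Int :=
    board_part.foldl (fun d ch => d.insert ch (d.getD ch 0 + 1)) PySem.Dict.empty
  -- {p: freq.get(p, 0) - freq.get(p.lower(), 0) for p in "PNBRQ"}
  "PNBRQ".toList.map
    (fun p => (String.mk [p], freq.getD p 0 - freq.getD (PySem.Chars.lowerChar p) 0))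

-- ===== PRECONDITION & SPEC =====
def Spec_get_material_balance (fen : String) (out : List (String × Int)) : Prop := out = get_material_balance_alt fen
instance (fen : String) (out : List (String × Int)) : Decidable (Spec_get_material_balance fen out) := by unfold Spec_get_material_balance; infer_instance

-- ===== CLAIM (what is proved, stated in full; the proofs are below) =====
def Claim_equal_get_material_balance : Prop := ∀ (fen : String), Dom_get_material_balance fen → Spec_get_material_balance fen (get_material_balance fen)

-- ===== LEMMAS AND PROOFS =====

-- proof helpers: the 5-key dict with symbolic values, and the per-character effect of A's loop body on one key
def pvD (p n b r q : Int) : PySem.Dict Char Int :=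
  PySem.Dict.mk [('P', p), ('N', n), ('B', b), ('R', r), ('Q', q)]

def pvDelta (c k : Char) : Int :=
  if c == '/' then 0
  else if PySem.Chars.isdigit c then 0
  else if PySem.Chars.isupper c then (if c = k then 1 else 0)
  else if PySem.Chars.islower c then (if PySem.Chars.upperChar c = k then -1 else 0)
  else 0

lemma pv_le_toNat (a b : Char) : a ≤ b ↔ a.toNat ≤ b.toNat := by
  rw [Char.le_def, UInt32.le_iff_toNat_le]
  exact Iff.rfl

lemma pv_char_eq_iff (a b : Char) : a = b ↔ a.toNat = b.toNat := by
  constructor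
  · intro h; rw [h]
  · intro h
    have h2 := congrArg Char.ofNat h
    rwa [Char.ofNat_toNat, Char.ofNat_toNat] at h2

lemma pv_isupper_iff (c : Char) : PySem.Chars.isupper c = true ↔ 65 ≤ c.toNat ∧ c.toNat ≤ 90 := by
  simp only [PySem.Chars.isupper, Bool.and_eq_true, decide_eq_true_eq, pv_le_toNat]
  exact Iff.rfl

lemma pv_islower_iff (c : Char) : PySem.Chars.islower c = true ↔ 97 ≤ c.toNat ∧ c.toNat ≤ 122 := by
  simp only [PySem.Chars.islower, Bool.and_eq_true, decide_eq_true_eq, pv_le_toNat]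
  exact Iff.rfl

lemma pv_isdigit_iff (c : Char) : PySem.Chars.isdigit c = true ↔ 48 ≤ c.toNat ∧ c.toNat ≤ 57 := by
  simp only [PySem.Chars.isdigit, Bool.and_eq_true, decide_eq_true_eq, pv_le_toNat]
  exact Iff.rfl

lemma pv_stepA_D (p n b r q : Int) (c : Char) :
    pvStepA (pvD p n b r q) c =
      pvD (p + pvDelta c 'P') (n + pvDelta c 'N') (b + pvDelta c 'B')
          (r + pvDelta c 'R') (q + pvDelta c 'Q') := by
  by_cases h1 : (c == '/') = true
  · have hd : ∀ k, pvDelta c k = 0 := fun k => by simp [pvDelta, h1]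
    simp [pvStepA, h1, hd]
  by_cases h2 : PySem.Chars.isdigit c = true
  · have hd : ∀ k, pvDelta c k = 0 := fun k => by simp [pvDelta, h1, h2]
    simp [pvStepA, h1, h2, hd]
  by_cases h3 : PySem.Chars.isupper c = true
  · have hd : ∀ k, pvDelta c k = if c = k then 1 else 0 := fun k => by
      simp [pvDelta, h1, h2, h3]
    by_cases h4 : (pvD p n b r q).contains c = true
    · have hmem : 'P' = c ∨ 'N' = c ∨ 'B' = c ∨ 'R' = c ∨ 'Q' = c := by
        simpa [pvD, PySem.Dict.contains] using h4
      rcases hmem with h | h | h | h | h <;> subst h <;>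
        simp [pvStepA, h1, h2, h3, hd, pvD, PySem.Dict.contains, PySem.Dict.modify,
          PySem.Dict.insert, PySem.Dict.getD, PySem.Dict.get?]
    · have hP : c ≠ 'P' := fun h => by subst h; exact h4 (by simp [pvD, PySem.Dict.contains])
      have hN : c ≠ 'N' := fun h => by subst h; exact h4 (by simp [pvD, PySem.Dict.contains])
      have hB : c ≠ 'B' := fun h => by subst h; exact h4 (by simp [pvD, PySem.Dict.contains])
      have hR : c ≠ 'R' := fun h => by subst h; exact h4 (by simp [pvD, PySem.Dict.contains])
      have hQ : c ≠ 'Q' := fun h => by subst h; exact h4 (by simp [pvD, PySem.Dict.contains])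
      simp [pvStepA, h1, h2, h3, h4, hd, hP, hN, hB, hR, hQ]
  by_cases h5 : PySem.Chars.islower c = true
  · have hd : ∀ k, pvDelta c k = if PySem.Chars.upperChar c = k then -1 else 0 := fun k => by
      simp [pvDelta, h1, h2, h3, h5]
    by_cases h6 : (pvD p n b r q).contains (PySem.Chars.upperChar c) = true
    · have hmem : 'P' = PySem.Chars.upperChar c ∨ 'N' = PySem.Chars.upperChar c ∨
          'B' = PySem.Chars.upperChar c ∨ 'R' = PySem.Chars.upperChar c ∨
          'Q' = PySem.Chars.upperChar c := by
        simpa [pvD, PySem.Dict.contains] using h6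
      rcases hmem with h | h | h | h | h <;>
        simp only [pvStepA, hd, ← h] <;>
        simp [h1, h2, h3, h5, pvD, PySem.Dict.contains, PySem.Dict.modify,
          PySem.Dict.insert, PySem.Dict.getD, PySem.Dict.get?] <;> ring
    · have hP : PySem.Chars.upperChar c ≠ 'P' := fun h => by
        rw [h] at h6; exact h6 (by simp [pvD, PySem.Dict.contains])
      have hN : PySem.Chars.upperChar c ≠ 'N' := fun h => by
        rw [h] at h6; exact h6 (by simp [pvD, PySem.Dict.contains])
      have hB : PySem.Chars.upperChar c ≠ 'B' := fun h => by
        rw [h] at h6; exact h6 (by simp [pvD, PySem.Dict.contains])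
      have hR : PySem.Chars.upperChar c ≠ 'R' := fun h => by
        rw [h] at h6; exact h6 (by simp [pvD, PySem.Dict.contains])
      have hQ : PySem.Chars.upperChar c ≠ 'Q' := fun h => by
        rw [h] at h6; exact h6 (by simp [pvD, PySem.Dict.contains])
      simp [pvStepA, h1, h2, h3, h5, h6, hd, hP, hN, hB, hR, hQ]
  · have hd : ∀ k, pvDelta c k = 0 := fun k => by simp [pvDelta, h1, h2, h3, h5]
    simp [pvStepA, h1, h2, h3, h5, hd]

lemma pv_foldA (l : List Char) (p n b r q : Int) :
    l.foldl pvStepA (pvD p n b r q) =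
      pvD (p + (l.map (pvDelta · 'P')).sum) (n + (l.map (pvDelta · 'N')).sum)
          (b + (l.map (pvDelta · 'B')).sum) (r + (l.map (pvDelta · 'R')).sum)
          (q + (l.map (pvDelta · 'Q')).sum) := by
  induction l generalizing p n b r q with
  | nil => simp
  | cons c l ih =>
    simp only [List.foldl_cons, pv_stepA_D, ih, List.map_cons, List.sum_cons]
    simp only [add_assoc]

lemma pv_delta_eq (c k lo : Char) (hk : 65 ≤ k.toNat ∧ k.toNat ≤ 90)
    (hlo : lo = PySem.Chars.lowerChar k) :
    pvDelta c k = (if c = k then 1 else 0) - (if c = lo then 1 else 0) := by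
  have hupk : PySem.Chars.isupper k = true := (pv_isupper_iff k).mpr hk
  have hlon : lo.toNat = k.toNat + 32 := by
    rw [hlo]
    simp only [PySem.Chars.lowerChar, hupk, if_true]
    rw [Char.toNat_ofNat, if_pos (Or.inl (by omega))]
  by_cases hck : c = k
  · subst hck
    have hg1 : (c == '/') = false := by
      rw [beq_eq_false_iff_ne]
      intro h
      rw [pv_char_eq_iff] at h
      simp at h
      omega
    have hg2 : PySem.Chars.isdigit c = false := by
      rw [Bool.eq_false_iff]
      intro h
      have hd := (pv_isdigit_iff c).mp h
      omega
    have hne : c ≠ lo := by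
      intro h
      rw [pv_char_eq_iff] at h
      omega
    simp [pvDelta, hg1, hg2, hupk, hne]
  · by_cases hclo : c = lo
    · subst hclo
      have hlowc : PySem.Chars.islower c = true := (pv_islower_iff c).mpr (by omega)
      have hg1 : (c == '/') = false := by
        rw [beq_eq_false_iff_ne]
        intro h
        rw [pv_char_eq_iff] at h
        simp at h
        omega
      have hg2 : PySem.Chars.isdigit c = false := by
        rw [Bool.eq_false_iff]
        intro h
        have hd := (pv_isdigit_iff c).mp h
        omega
      have hg3 : PySem.Chars.isupper c = false := by
        rw [Bool.eq_false_iff]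
        intro h
        have hd := (pv_isupper_iff c).mp h
        omega
      have hup : PySem.Chars.upperChar c = k := by
        simp only [PySem.Chars.upperChar, hlowc, if_true]
        rw [pv_char_eq_iff, Char.toNat_ofNat, if_pos (Or.inl (by omega))]
        omega
      simp [pvDelta, hg1, hg2, hg3, hlowc, hup, hck]
    · rw [if_neg hck, if_neg hclo]
      by_cases g1 : (c == '/') = true
      · simp [pvDelta, g1]
      by_cases g2 : PySem.Chars.isdigit c = true
      · simp [pvDelta, g1, g2]
      by_cases g3 : PySem.Chars.isupper c = true
      · simp [pvDelta, g1, g2, g3, hck]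
      by_cases g5 : PySem.Chars.islower c = true
      · have hne : PySem.Chars.upperChar c ≠ k := by
          intro g6
          have hb := (pv_islower_iff c).mp g5
          simp only [PySem.Chars.upperChar, g5, if_true] at g6
          have ht := congrArg Char.toNat g6
          rw [Char.toNat_ofNat, if_pos (Or.inl (by omega))] at ht
          exact hclo ((pv_char_eq_iff c lo).mpr (by omega))
        simp [pvDelta, g1, g2, g3, g5, hne]
      · simp [pvDelta, g1, g2, g3, g5]

lemma pv_balance_eq (l : List Char) (k lo : Char) (hk : 65 ≤ k.toNat ∧ k.toNat ≤ 90)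
    (hlo : lo = PySem.Chars.lowerChar k) :
    (l.map (pvDelta · k)).sum = ((l.count k : Int)) - ((l.count lo : Int)) := by
  induction l with
  | nil => simp
  | cons c l ih =>
    simp only [List.map_cons, List.sum_cons, ih, pv_delta_eq c k lo hk hlo, List.count_cons]
    by_cases h1 : c = k <;> by_cases h2 : c = lo <;>
      simp [h1, h2] <;> push_cast <;> ring

-- ===== VERDICT (by name: the statement is the Claim_ definition above) =====
theorem get_material_balance_spec : Claim_equal_get_material_balance := by
  intro fen _
  unfold Spec_get_material_balance get_material_balance get_material_balance_alt
  have hinit : PySem.Dict.ofList [('P', (0:Int)), ('N', 0), ('B', 0), ('R', 0), ('Q', 0)] =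
      pvD 0 0 0 0 0 := by decide
  rw [hinit]
  set board := PySem.List.pyGetD (PySem.Chars.splitOn fen.toList [' ']) 0 [] with hb
  simp only [pv_foldA]
  have hfreq : ∀ v : Char,
      (board.foldl (fun d ch => d.insert ch (d.getD ch 0 + 1)) PySem.Dict.empty).getD v 0 =
        (board.count v : Int) := by
    intro v
    rw [PySem.Dict.getD_foldl_insert_add_one, PySem.Dict.getD_empty, zero_add]
  have h1 := pv_balance_eq board 'P' 'p' (by decide) (by decide)
  have h2 := pv_balance_eq board 'N' 'n' (by decide) (by decide)
  have h3 := pv_balance_eq board 'B' 'b' (by decide) (by decide)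
  have h4 := pv_balance_eq board 'R' 'r' (by decide) (by decide)
  have h5 := pv_balance_eq board 'Q' 'q' (by decide) (by decide)
  have hs : "PNBRQ".toList = ['P', 'N', 'B', 'R', 'Q'] := by decide
  simp [pvD, PySem.Dict.items, hfreq, h1, h2, h3, h4, h5, hs,
    PySem.Chars.lowerChar, PySem.Chars.isupper]
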